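-- pv_equiv track=rewrite | github.com/a1wjun/kicad-kbplacer | kbplacer/kle_serial.py | reorder_items_kle
-- ===== SOURCE A (Python) =====
-- from typing import Any, List, Optional, Tuple, Type
--
-- REVERSE_LABEL_MAP: List[List[int]] = [
--     # 0  1  2  3  4  5  6  7  8  9 10 11   # align flags
--     [ 0, 8, 2, 6, 9, 7, 1,10, 3, 4,11, 5], # 0 = no centering
--     [-1, 0,-1,-1, 6,-1,-1, 1,-1, 4,11, 5], # 1 = center x
--     [-1,-1,-1, 0, 8, 2,-1,-1,-1, 4,11, 5], # 2 = center y
--     [-1,-1,-1,-1, 0,-1,-1,-1,-1, 4,11, 5], # 3 = center x & y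
--     [ 0, 8, 2, 6, 9, 7, 1,10, 3,-1, 4,-1], # 4 = center front (default)
--     [-1, 0,-1,-1, 6,-1,-1, 1,-1,-1, 4,-1], # 5 = center front & x
--     [-1,-1,-1, 0, 8, 2,-1,-1,-1,-1, 4,-1], # 6 = center front & y
--     [-1,-1,-1,-1, 0,-1,-1,-1,-1,-1, 4,-1], # 7 = center front & x & y
-- ]
--
-- def reorder_items_kle(items, align) -> List[Any]:
--     ret: List[Any] = 12 * [None]
--     for i, label in enumerate(items):
--         if label:
--             index = REVERSE_LABEL_MAP[align][i]
--             if index == -1: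
--                 ret = []
--                 break
--             ret[index] = label
--     while ret and ret[-1] is None:
--         ret.pop()
--     return ret
-- ===== SOURCE B (Python) =====
-- REVERSE_LABEL_MAP = [
--     [ 0, 8, 2, 6, 9, 7, 1,10, 3, 4,11, 5],
--     [-1, 0,-1,-1, 6,-1,-1, 1,-1, 4,11, 5],
--     [-1,-1,-1, 0, 8, 2,-1,-1,-1, 4,11, 5],
--     [-1,-1,-1,-1, 0,-1,-1,-1,-1, 4,11, 5],
--     [ 0, 8, 2, 6, 9, 7, 1,10, 3,-1, 4,-1],
--     [-1, 0,-1,-1, 6,-1,-1, 1,-1,-1, 4,-1],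
--     [-1,-1,-1, 0, 8, 2,-1,-1,-1,-1, 4,-1],
--     [-1,-1,-1,-1, 0,-1,-1,-1,-1,-1, 4,-1],
-- ]
--
-- def reorder_items_kle(items, align):
--     # Output-driven inverse lookup: instead of scattering labels into a
--     # preallocated buffer and trimming, walk the output slots from 11 down to 0
--     # and search the input for the label that maps to each slot (each row's
--     # non -1 targets are distinct, so the first match is the only one);
--     # building back-to-front means trailing empty slots are never emitted.
--     row = REVERSE_LABEL_MAP[align]
--     for i, item in enumerate(items):
--         if item and row[i] == -1:
--             return []
--     out = []
--     for j in range(11, -1, -1):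
--         label = None
--         for i, item in enumerate(items):
--             if item and row[i] == j:
--                 label = item
--                 break
--         if label is not None or out:
--             out.append(label)
--     out.reverse()
--     return out
-- ===== Notes on version B (the rewrite author's own statement) =====
-- stated objective: alternative
-- what changed: B inverts the traversal: instead of scattering labels into a preallocated 12-slot buffer and popping trailing Nones, it walks the output slots from 11 down to 0, searches items for the (unique) label mapped to each slot, and builds the result back-to-front so trailing empty slots are never emitted.
-- outside the precondition, e.g. on reorder_items_kle([], 8): A returns [], B raises IndexError
import Mathlib
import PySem

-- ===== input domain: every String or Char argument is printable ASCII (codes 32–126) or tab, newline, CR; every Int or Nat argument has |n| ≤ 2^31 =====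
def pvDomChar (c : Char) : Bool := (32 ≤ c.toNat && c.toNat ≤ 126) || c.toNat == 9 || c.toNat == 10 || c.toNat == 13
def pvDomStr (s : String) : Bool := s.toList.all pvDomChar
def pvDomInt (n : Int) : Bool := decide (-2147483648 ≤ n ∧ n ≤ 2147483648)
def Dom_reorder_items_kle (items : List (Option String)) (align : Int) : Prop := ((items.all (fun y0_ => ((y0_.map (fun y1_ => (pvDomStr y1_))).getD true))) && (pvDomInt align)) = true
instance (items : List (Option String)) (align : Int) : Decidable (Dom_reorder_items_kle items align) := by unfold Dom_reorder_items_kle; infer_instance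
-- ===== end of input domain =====

-- B inverts the traversal: it walks the 12 output slots from the top down, searching the
-- input for the (unique) label mapped to each slot, building back-to-front so trailing
-- empty slots are never emitted (objective: alternative).

-- ===== PORT A =====

def pvRLM : List (List Int) :=
  [[ 0, 8, 2, 6, 9, 7, 1,10, 3, 4,11, 5],
   [-1, 0,-1,-1, 6,-1,-1, 1,-1, 4,11, 5],
   [-1,-1,-1, 0, 8, 2,-1,-1,-1, 4,11, 5],
   [-1,-1,-1,-1, 0,-1,-1,-1,-1, 4,11, 5],
   [ 0, 8, 2, 6, 9, 7, 1,10, 3,-1, 4,-1],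
   [-1, 0,-1,-1, 6,-1,-1, 1,-1,-1, 4,-1],
   [-1,-1,-1, 0, 8, 2,-1,-1,-1,-1, 4,-1],
   [-1,-1,-1,-1, 0,-1,-1,-1,-1,-1, 4,-1]]

-- 'if label:' — truthy iff a non-empty string
def pvTruthy (o : Option String) : Bool :=
  match o with
  | none => false
  | some s => s ≠ ""

-- the 'for i, label in enumerate(items): …' loop of A (break ⇒ returns [])
def pvLoopA (align : Int) : List (Option String) → Nat → List (Option String) → List (Option String)
  | [], _, ret => ret
  | label :: rest, i, ret =>
    if pvTruthy label then
      match PySem.List.pyGet? pvRLM align with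
      | none => ret          -- IndexError in Python (outside Pre_)
      | some row =>
        match PySem.List.pyGet? row (i : Int) with
        | none => ret        -- IndexError in Python (outside Pre_)
        | some index =>
          if index = -1 then []
          else pvLoopA align rest (i + 1) (PySem.List.pySetD ret index label)
    else pvLoopA align rest (i + 1) ret

-- 'while ret and ret[-1] is None: ret.pop()'
def pvPopTrailing (ret : List (Option String)) : List (Option String) :=
  if h : ret ≠ [] ∧ PySem.List.pyGet? ret (-1) = some none then
    pvPopTrailing ret.dropLast
  else ret
termination_by ret.length
decreasing_by
  have : ret ≠ [] := h.1
  cases ret with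
  | nil => exact absurd rfl this
  | cons a t => simp [List.length_dropLast]

def reorder_items_kle (items : List (Option String)) (align : Int) : List (Option String) :=
  pvPopTrailing (pvLoopA align items 0 (List.replicate 12 none))

-- ===== PORT B =====

-- B's first loop: 'for i, item in enumerate(items): if item and row[i] == -1: return []'
def pvBadB (row : List Int) : List (Option String) → Nat → Bool
  | [], _ => false
  | item :: rest, i =>
    if pvTruthy item then
      match PySem.List.pyGet? row (i : Int) with
      | none => false        -- IndexError in Python (outside Pre_)
      | some v => if v = -1 then true else pvBadB row rest (i + 1)
    else pvBadB row rest (i + 1)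

-- B's inner loop: 'for i, item in enumerate(items): if item and row[i] == j: label = item; break'
def pvFindB (row : List Int) (j : Int) : List (Option String) → Nat → Option String
  | [], _ => none
  | item :: rest, i =>
    if pvTruthy item then
      match PySem.List.pyGet? row (i : Int) with
      | none => none         -- IndexError in Python (outside Pre_)
      | some v => if v = j then item else pvFindB row j rest (i + 1)
    else pvFindB row j rest (i + 1)

-- B's outer loop 'for j in range(11, -1, -1): … out.append(…)' followed by 'out.reverse()':
-- ported with the accumulator holding the reversed 'out', so append+reverse becomes cons
def pvBuildB (row : List Int) (items : List (Option String)) : Nat → List (Option String) → List (Option String)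
  | 0, acc => acc
  | k + 1, acc =>
    let label := pvFindB row (k : Int) items 0
    if label.isSome || !acc.isEmpty then pvBuildB row items k (label :: acc)
    else pvBuildB row items k acc

def reorder_items_kle_alt (items : List (Option String)) (align : Int) : List (Option String) :=
  match PySem.List.pyGet? pvRLM align with
  | none => []               -- IndexError in Python (outside Pre_)
  | some row =>
    if pvBadB row items 0 then []
    else pvBuildB row items 12 []

-- ===== PRECONDITION & SPEC =====
-- Pre_ excludes out-of-range align (B's eager row lookup raises IndexError there while A,
-- looking the row up lazily, happens to return [] when no label is truthy) and items with a
-- truthy label at position ≥ 12 (there both programs can raise IndexError on the row lookup).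
def Pre_reorder_items_kle (items : List (Option String)) (align : Int) : Prop :=
  PySem.Raise.InRange pvRLM.length align ∧ (items.drop 12).all (fun o => !pvTruthy o) = true
instance (items : List (Option String)) (align : Int) : Decidable (Pre_reorder_items_kle items align) := by
  unfold Pre_reorder_items_kle; infer_instance
def pvWitness_reorder_items_kle : List (Option String) × Int := ([some "x", none, some "y"], 4)

def Spec_reorder_items_kle (items : List (Option String)) (align : Int) (out : List (Option String)) : Prop := out = reorder_items_kle_alt items align
instance (items : List (Option String)) (align : Int) (out : List (Option String)) : Decidable (Spec_reorder_items_kle items align out) := by unfold Spec_reorder_items_kle; infer_instance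

-- ===== CLAIM (what is proved, stated in full; the proofs are below) =====
def Claim_equal_reorder_items_kle : Prop := ∀ (items : List (Option String)) (align : Int), Dom_reorder_items_kle items align → Pre_reorder_items_kle items align → Spec_reorder_items_kle items align (reorder_items_kle items align)

-- ===== LEMMAS AND PROOFS =====

theorem pvRLM_facts : ∀ row ∈ pvRLM, row.length = 12 ∧ ∀ x ∈ row, -1 ≤ x ∧ x < 12 := by decide

-- each row's non -1 entries are pairwise distinct
theorem pvRLM_distinct : ∀ row ∈ pvRLM, ∀ a b : Fin 12, a ≠ b →
    row.getD a 0 = row.getD b 0 → row.getD a 0 = -1 := by decide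

theorem pvPopTrailing_nil : pvPopTrailing [] = [] := by
  rw [pvPopTrailing]; simp

theorem pvPopTrailing_concat_none (xs : List (Option String)) :
    pvPopTrailing (xs ++ [none]) = pvPopTrailing xs := by
  rw [pvPopTrailing]
  simp [PySem.List.pyGet?_neg_one]

theorem pvPopTrailing_last_some (xs : List (Option String)) (s : String)
    (h : xs.getLast? = some (some s)) : pvPopTrailing xs = xs := by
  rw [pvPopTrailing]
  simp [PySem.List.pyGet?_neg_one, h]

-- an in-range lookup in a 12-entry row
theorem pvRow_get (row : List Int) (h12 : row.length = 12) (i : Nat) (hi : i < 12) :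
    PySem.List.pyGet? row (i : Int) = some (row.getD i 0) := by
  rw [PySem.List.pyGet?_natCast]
  rw [List.getElem?_eq_getElem (by omega), List.getD_eq_getElem?_getD,
    List.getElem?_eq_getElem (by omega)]
  rfl

-- truthy positions are below 12 (from Pre_'s tail condition)
theorem pvTail (items : List (Option String))
    (h : (items.drop 12).all (fun o => !pvTruthy o) = true) :
    ∀ k, pvTruthy (items.getD k none) = true → k < 12 := by
  intro k hk
  by_contra hk'
  have hk12 : 12 ≤ k := by omega
  cases hget : items[k]? with
  | none =>
    rw [List.getD_eq_getElem?_getD, hget] at hk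
    simp [pvTruthy] at hk
  | some x =>
    have hx : x ∈ items.drop 12 := by
      apply List.mem_of_getElem? (i := k - 12)
      rw [List.getElem?_drop]
      rwa [show 12 + (k - 12) = k by omega]
    have := List.all_eq_true.mp h x hx
    rw [List.getD_eq_getElem?_getD, hget] at hk
    simp only [Option.getD_some] at hk
    simp [hk] at this

theorem pvShiftT (item : Option String) (rest : List (Option String)) (i : Nat) (P : Nat → Prop)
    (H : ∀ k, pvTruthy ((item :: rest).getD k none) = true → P (i + k)) :
    ∀ k, pvTruthy (rest.getD k none) = true → P (i + 1 + k) := by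
  intro k hk
  have := H (k + 1) (by simpa using hk)
  simpa [show i + (k + 1) = i + 1 + k by omega] using this

-- if no truthy item maps to j, the inner search returns None
theorem pvFindB_none (row : List Int) (h12 : row.length = 12) (j : Int) :
    ∀ (rest : List (Option String)) (i : Nat),
      (∀ k, pvTruthy (rest.getD k none) = true → i + k < 12) →
      (∀ k, pvTruthy (rest.getD k none) = true → row.getD (i + k) 0 ≠ j) →
      pvFindB row j rest i = none := by
  intro rest
  induction rest with
  | nil => intro i _ _; rfl
  | cons item rest ih =>
    intro i hT hNJ
    by_cases ht : pvTruthy item = true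
    · have hi : i < 12 := by simpa using hT 0 (by simpa using ht)
      have hne : row.getD i 0 ≠ j := by simpa using hNJ 0 (by simpa using ht)
      simp only [pvFindB, ht, if_pos, pvRow_get row h12 i hi]
      rw [if_neg hne]
      exact ih (i + 1) (pvShiftT item rest i (fun m => m < 12) hT) (pvShiftT item rest i (fun m => row.getD m 0 ≠ j) hNJ)
    · simp only [pvFindB, ht, Bool.false_eq_true, if_false]
      exact ih (i + 1) (pvShiftT item rest i (fun m => m < 12) hT) (pvShiftT item rest i (fun m => row.getD m 0 ≠ j) hNJ)

-- pvBadB = false means no truthy item maps to -1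
theorem pvBadB_false (row : List Int) (h12 : row.length = 12) :
    ∀ (rest : List (Option String)) (i : Nat),
      (∀ k, pvTruthy (rest.getD k none) = true → i + k < 12) →
      pvBadB row rest i = false →
      ∀ k, pvTruthy (rest.getD k none) = true → row.getD (i + k) 0 ≠ -1 := by
  intro rest
  induction rest with
  | nil => intro i _ _ k hk; simp [pvTruthy] at hk
  | cons item rest ih =>
    intro i hT hb k hk
    by_cases ht : pvTruthy item = true
    · have hi : i < 12 := by simpa using hT 0 (by simpa using ht)
      simp only [pvBadB, ht, if_pos, pvRow_get row h12 i hi] at hb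
      by_cases hv : row.getD i 0 = -1
      · rw [if_pos hv] at hb; exact absurd hb (by simp)
      · rw [if_neg hv] at hb
        cases k with
        | zero => simpa using hv
        | succ k' =>
          have := ih (i + 1) (pvShiftT item rest i (fun m => m < 12) hT) hb k' (by simpa using hk)
          simpa [show i + 1 + k' = i + (k' + 1) by omega] using this
    · simp only [pvBadB, ht, Bool.false_eq_true, if_false] at hb
      cases k with
      | zero => simp at hk; exact absurd hk (by simpa using ht)
      | succ k' =>
        have := ih (i + 1) (pvShiftT item rest i (fun m => m < 12) hT) hb k' (by simpa using hk)
        simpa [show i + 1 + k' = i + (k' + 1) by omega] using this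

-- pvBadB = true makes A's loop break to []
theorem pvBadB_true_loopA (align : Int) (row : List Int) (h12 : row.length = 12)
    (hrow : PySem.List.pyGet? pvRLM align = some row) :
    ∀ (rest : List (Option String)) (i : Nat) (ret : List (Option String)),
      (∀ k, pvTruthy (rest.getD k none) = true → i + k < 12) →
      pvBadB row rest i = true →
      pvLoopA align rest i ret = [] := by
  intro rest
  induction rest with
  | nil => intro i ret _ hb; simp [pvBadB] at hb
  | cons item rest ih =>
    intro i ret hT hb
    by_cases ht : pvTruthy item = true
    · have hi : i < 12 := by simpa using hT 0 (by simpa using ht)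
      have hg := pvRow_get row h12 i hi
      simp only [pvBadB, ht, if_pos, hg] at hb
      simp only [pvLoopA, ht, if_pos, hrow, hg]
      by_cases hv : row.getD i 0 = -1
      · rw [if_pos hv]
      · rw [if_neg hv] at hb
        rw [if_neg hv]
        exact ih (i + 1) _ (pvShiftT item rest i (fun m => m < 12) hT) hb
    · simp only [pvBadB, ht, Bool.false_eq_true, if_false] at hb
      simp only [pvLoopA, ht, Bool.false_eq_true, if_false]
      exact ih (i + 1) ret (pvShiftT item rest i (fun m => m < 12) hT) hb

theorem pvMapRange_eq (ret : List (Option String)) (h : ret.length = 12) :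
    (List.range 12).map (fun j => ret.getD j none) = ret := by
  apply List.ext_getElem
  · simp [h]
  · intro n h1 h2
    simp [List.getD_eq_getElem?_getD, List.getElem?_eq_getElem (by omega : n < ret.length)]

-- A's loop result, slot by slot: the first (= unique) truthy label searched by B, else the old slot
theorem pvLoopA_char (align : Int) (row : List Int) (hrowmem : row ∈ pvRLM)
    (hrow : PySem.List.pyGet? pvRLM align = some row) :
    ∀ (rest : List (Option String)) (i : Nat) (ret : List (Option String)),
      ret.length = 12 →
      (∀ k, pvTruthy (rest.getD k none) = true → i + k < 12) →
      (∀ k, pvTruthy (rest.getD k none) = true → row.getD (i + k) 0 ≠ -1) →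
      pvLoopA align rest i ret =
        (List.range 12).map (fun (j : Nat) => (pvFindB row (j : Int) rest i).or (ret.getD j none)) := by
  have h12 : row.length = 12 := (pvRLM_facts row hrowmem).1
  intro rest
  induction rest with
  | nil =>
    intro i ret hlen _ _
    simp only [pvLoopA, pvFindB, Option.none_or]
    exact (pvMapRange_eq ret hlen).symm
  | cons item rest ih =>
    intro i ret hlen hT hNB
    by_cases ht : pvTruthy item = true
    · have hi : i < 12 := by simpa using hT 0 (by simpa using ht)
      have hg := pvRow_get row h12 i hi
      set v := row.getD i 0 with hv
      have hvne : v ≠ -1 := by simpa using hNB 0 (by simpa using ht)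
      have hvmem : v ∈ row := by
        rw [hv, List.getD_eq_getElem?_getD, List.getElem?_eq_getElem (by omega)]
        exact List.getElem_mem _
      have hvb := (pvRLM_facts row hrowmem).2 v hvmem
      have hv0 : 0 ≤ v := by omega
      have hv12 : v < 12 := hvb.2
      obtain ⟨s, hs⟩ : ∃ s, item = some s := by
        cases item with
        | none => simp [pvTruthy] at ht
        | some s => exact ⟨s, rfl⟩
      simp only [pvLoopA, ht, if_pos, hrow, hg, if_neg hvne]
      rw [PySem.List.pySetD_of_nonneg _ _ hv0]
      rw [ih (i + 1) (ret.set v.toNat item) (by simp [hlen]) (pvShiftT item rest i (fun m => m < 12) hT) (pvShiftT item rest i (fun m => row.getD m 0 ≠ -1) hNB)]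
      apply List.map_congr_left
      intro j hj
      have hj12 : j < 12 := List.mem_range.mp hj
      simp only [pvFindB, ht, if_pos, hg]
      by_cases hje : v = (j : Int)
      · rw [if_pos hje]
        have hjv : j = v.toNat := by omega
        have hfnone : pvFindB row (j : Int) rest (i + 1) = none := by
          apply pvFindB_none row h12 _ rest (i + 1) (pvShiftT item rest i (fun m => m < 12) hT)
          intro k hk
          have hk12 : i + 1 + k < 12 := pvShiftT item rest i (fun m => m < 12) hT k hk
          intro heq
          have := pvRLM_distinct row hrowmem ⟨i + 1 + k, hk12⟩ ⟨i, hi⟩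
            (by simp; omega) (by rw [heq, ← hje])
          rw [heq, ← hje] at this
          exact hvne this
        rw [hfnone]
        have : (ret.set v.toNat item).getD j none = item := by
          rw [hjv, List.getD_eq_getElem?_getD,
            List.getElem?_set_self (by omega : v.toNat < ret.length)]
          simp
        rw [this, hs]
        simp
      · rw [if_neg hje]
        have : (ret.set v.toNat item).getD j none = ret.getD j none := by
          rw [List.getD_eq_getElem?_getD, List.getD_eq_getElem?_getD,
            List.getElem?_set_ne (by omega : v.toNat ≠ j)]
        rw [this]
    · simp only [pvLoopA, pvFindB, ht, Bool.false_eq_true, if_false]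
      exact ih (i + 1) ret hlen (pvShiftT item rest i (fun m => m < 12) hT) (pvShiftT item rest i (fun m => row.getD m 0 ≠ -1) hNB)

-- B's back-to-front build equals trimming the full slot map
theorem pvBuildB_char (row : List Int) (items : List (Option String)) :
    ∀ (k : Nat) (acc : List (Option String)),
      pvBuildB row items k acc =
        if acc.isEmpty then
          pvPopTrailing ((List.range k).map (fun (j : Nat) => pvFindB row (j : Int) items 0))
        else ((List.range k).map (fun (j : Nat) => pvFindB row (j : Int) items 0)) ++ acc := by
  intro k
  induction k with
  | zero =>
    intro acc
    cases acc with
    | nil => simp [pvBuildB, pvPopTrailing_nil]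
    | cons a as => simp [pvBuildB]
  | succ k ih =>
    intro acc
    cases acc with
    | cons a as =>
      simp only [pvBuildB, List.isEmpty_cons, Bool.not_false, Bool.or_true, if_pos]
      rw [ih]
      simp [List.range_succ]
    | nil =>
      cases hl : pvFindB row (k : Int) items 0 with
      | some s =>
        have h1 : pvBuildB row items (k + 1) ([] : List (Option String))
            = pvBuildB row items k [some s] := by
          simp [pvBuildB, hl]
        have hlast : ((List.range (k + 1)).map (fun (j : Nat) => pvFindB row (j : Int) items 0)).getLast?
            = some (some s) := by
          rw [List.range_succ, List.map_append]
          simp [hl]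
        rw [h1, ih]
        rw [if_neg (show ¬((some s :: ([] : List (Option String))).isEmpty = true) by simp),
          if_pos (show (([] : List (Option String)).isEmpty = true) by simp)]
        rw [pvPopTrailing_last_some _ s hlast]
        simp [List.range_succ, hl]
      | none =>
        have h1 : pvBuildB row items (k + 1) ([] : List (Option String))
            = pvBuildB row items k [] := by
          simp [pvBuildB, hl]
        rw [h1, ih]
        rw [if_pos (show (([] : List (Option String)).isEmpty = true) by simp),
          if_pos (show (([] : List (Option String)).isEmpty = true) by simp)]
        rw [List.range_succ, List.map_append]
        simp only [List.map_cons, List.map_nil, hl]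
        rw [pvPopTrailing_concat_none]

-- ===== VERDICT (by name: the statement is the Claim_ definition above) =====
theorem reorder_items_kle_spec : Claim_equal_reorder_items_kle := by
  intro items align _ hpre
  obtain ⟨hin, htail⟩ := hpre
  obtain ⟨row, hrow⟩ : ∃ row, PySem.List.pyGet? pvRLM align = some row := by
    cases h : PySem.List.pyGet? pvRLM align with
    | none => exact absurd hin ((PySem.List.pyGet?_eq_none_iff _ _).mp h)
    | some r => exact ⟨r, rfl⟩
  have hrowmem : row ∈ pvRLM := PySem.List.mem_of_pyGet?_eq_some _ hrow
  have h12 : row.length = 12 := (pvRLM_facts row hrowmem).1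
  have hT : ∀ k, pvTruthy (items.getD k none) = true → 0 + k < 12 := by
    intro k hk; have := pvTail items htail k hk; omega
  unfold Spec_reorder_items_kle reorder_items_kle reorder_items_kle_alt
  simp only [hrow]
  cases hbad : pvBadB row items 0 with
  | true =>
    rw [if_pos rfl]
    rw [pvBadB_true_loopA align row h12 hrow items 0 _ hT hbad, pvPopTrailing_nil]
  | false =>
    rw [if_neg (by simp)]
    have hNB := pvBadB_false row h12 items 0 hT hbad
    rw [pvLoopA_char align row hrowmem hrow items 0 _ (by simp) hT hNB]
    rw [pvBuildB_char row items 12 []]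
    rw [if_pos (show (([] : List (Option String)).isEmpty = true) by simp)]
    congr 1
    apply List.map_congr_left
    intro j hj
    have hj12 : j < 12 := List.mem_range.mp hj
    interval_cases j <;> simp
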